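-- pv_equiv track=rewrite | github.com/Sii-liuzhihong/AHAT | src/ahat/pddl/problem_generator.py | _format_objects_section
-- ===== SOURCE A (Python) =====
-- from collections import defaultdict
-- from typing import Any, Dict, List, Optional, Set, Tuple, Union
--
-- def _format_objects_section(objects_to_define: Set[Tuple[str, str]]) -> str:
--     by_type: Dict[str, List[str]] = defaultdict(list)
--     for name, obj_type in objects_to_define:
--         by_type[obj_type].append(name)
--     return "".join(
--         f"\n\t{' '.join(sorted(names))} - {obj_type}"
--         for obj_type, names in sorted(by_type.items())
--     )
-- ===== SOURCE B (Python) =====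
-- def _format_objects_section(objects_to_define):
--     types = sorted({t for _, t in objects_to_define})
--     parts = []
--     for t in types:
--         names = sorted(n for n, t2 in objects_to_define if t2 == t)
--         parts.append(f"\n\t{' '.join(names)} - {t}")
--     return "".join(parts)
-- ===== Notes on version B (the rewrite author's own statement) =====
-- stated objective: alternative
-- what changed: B drops the defaultdict grouping: it collects the distinct types, sorts them once, and rescans the input per type to build each already-sorted section.
import Mathlib
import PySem

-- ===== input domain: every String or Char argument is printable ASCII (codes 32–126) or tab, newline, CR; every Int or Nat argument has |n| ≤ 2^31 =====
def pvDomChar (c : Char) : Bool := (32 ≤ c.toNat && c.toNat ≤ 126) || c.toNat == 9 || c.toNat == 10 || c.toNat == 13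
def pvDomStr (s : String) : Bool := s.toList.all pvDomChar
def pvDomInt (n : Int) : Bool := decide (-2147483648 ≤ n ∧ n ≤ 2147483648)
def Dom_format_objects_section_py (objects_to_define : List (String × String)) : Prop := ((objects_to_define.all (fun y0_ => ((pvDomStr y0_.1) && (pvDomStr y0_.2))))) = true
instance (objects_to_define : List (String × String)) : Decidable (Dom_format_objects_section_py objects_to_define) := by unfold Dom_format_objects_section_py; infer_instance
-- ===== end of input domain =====

-- B replaces A's defaultdict grouping by collecting the distinct types, sorting them once,
-- and rescanning the input per type (alternative decomposition; no dict is maintained).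


-- ===== PORT A =====
-- by_type[obj_type].append(name)  =  modify obj_type [] (· ++ [name]);
-- sorted(by_type.items()) compares (str, list) tuples, but the dict's keys are distinct so the
-- list components are never compared: sorting by the first component is exact here.
def format_objects_section_py (objects_to_define : List (String × String)) : String :=
  let by_type : PySem.Dict String (List String) :=
    objects_to_define.foldl (fun d p => d.modify p.2 [] (· ++ [p.1])) PySem.Dict.empty
  PySem.Str.join ""
    ((PySem.List.sorted by_type.items (fun p => p.1) false).map
      (fun p => "\n\t" ++ PySem.Str.join " " (PySem.List.sorted p.2 (fun n => n) false) ++ " - " ++ p.1))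

-- ===== PORT B =====
def format_objects_section_py_alt (objects_to_define : List (String × String)) : String :=
  let types := PySem.List.sorted (PySem.Set.ofList (objects_to_define.map Prod.snd)) (fun t => t) false
  PySem.Str.join ""
    (types.map (fun t =>
      "\n\t" ++
        PySem.Str.join " "
          (PySem.List.sorted ((objects_to_define.filter (fun p => p.2 == t)).map Prod.fst) (fun n => n) false)
        ++ " - " ++ t))

-- ===== PRECONDITION & SPEC =====
def Spec_format_objects_section_py (objects_to_define : List (String × String)) (out : String) : Prop := out = format_objects_section_py_alt objects_to_define
instance (objects_to_define : List (String × String)) (out : String) : Decidable (Spec_format_objects_section_py objects_to_define out) := by unfold Spec_format_objects_section_py; infer_instance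

-- ===== CLAIM (what is proved, stated in full; the proofs are below) =====
def Claim_equal_format_objects_section_py : Prop := ∀ (objects_to_define : List (String × String)), Dom_format_objects_section_py objects_to_define → Spec_format_objects_section_py objects_to_define (format_objects_section_py objects_to_define)

-- ===== LEMMAS AND PROOFS =====

-- the grouping dict of A, named for the proofs
def pvGroup (objs : List (String × String)) : PySem.Dict String (List String) :=
  objs.foldl (fun d p => d.modify p.2 [] (· ++ [p.1])) PySem.Dict.empty

lemma pvGroup_getD (objs : List (String × String)) (t : String) :
    (pvGroup objs).getD t [] = (objs.filter (fun p => p.2 == t)).map Prod.fst := by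
  have h : pvGroup objs
      = (objs.map Prod.swap).foldl (fun d p => d.modify p.1 [] (· ++ [p.2])) PySem.Dict.empty := by
    rw [List.foldl_map]; rfl
  rw [h, PySem.Dict.getD_foldl_modify_append]
  simp [List.filter_map, Function.comp_def]

lemma pvGroup_keys (objs : List (String × String)) :
    (pvGroup objs).keys = PySem.Set.ofList (objs.map Prod.snd) := by
  unfold pvGroup
  rw [PySem.Dict.keys_foldl_modify_key]
  simp [PySem.Dict.keys_empty, PySem.Set.update_nil_left]

lemma pvGroup_keys_nodup (objs : List (String × String)) : (pvGroup objs).keys.Nodup := by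
  rw [pvGroup_keys]; exact PySem.Set.nodup_ofList _

-- sorted(by_type.items()) is the sorted distinct types paired with their buckets
lemma pvSorted_items (objs : List (String × String)) :
    PySem.List.sorted (pvGroup objs).items (fun p => p.1) false
      = (PySem.List.sorted (PySem.Set.ofList (objs.map Prod.snd)) (fun t => t) false).map
          (fun t => (t, (pvGroup objs).getD t [])) := by
  apply PySem.List.sorted_eq_of_perm_of_pairwise_lt
  · have hitems : (pvGroup objs).items
        = (pvGroup objs).keys.map (fun k => (k, (pvGroup objs).getD k [])) :=
      PySem.Dict.items_eq_map_keys _ (pvGroup_keys_nodup objs) []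
    rw [hitems, pvGroup_keys]
    exact ((PySem.List.sorted_perm _ _ _).map _)
  · have hp := PySem.List.sorted_ofList_pairwise_lt (xs := objs.map Prod.snd)
    exact hp.map _ (fun a b h => h)

theorem format_objects_section_py_spec_aux (objs : List (String × String)) :
    format_objects_section_py objs = format_objects_section_py_alt objs := by
  unfold format_objects_section_py format_objects_section_py_alt
  have h1 : (objs.foldl (fun d p => d.modify p.2 [] (· ++ [p.1])) PySem.Dict.empty) = pvGroup objs := rfl
  simp only [h1, pvSorted_items, List.map_map]
  congr 1
  apply List.map_congr_left
  intro t _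
  simp [Function.comp, pvGroup_getD]

-- ===== VERDICT (by name: the statement is the Claim_ definition above) =====
theorem format_objects_section_py_spec : Claim_equal_format_objects_section_py := by
  intro objs _
  exact format_objects_section_py_spec_aux objs
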